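-- pv_equiv track=rewrite | github.com/mysociety/stringprint2 | stringprint/tools/deepink.py | move_extended_close
-- ===== SOURCE A (Python) =====
-- def move_extended_close(content: str) -> str:
--     """
--     moves ]] onto next line to escape difficulties.
--     """
--     final = []
--     for l in content.split("\n"):
--         if l.strip()[-2:] == "]]":
--             final.append(l.strip()[:-2])
--             final.append("]]")
--         else:
--             final.append(l)
--
--     return "\n".join(final)
-- ===== SOURCE B (Python) =====
-- import re
--
-- # One whole-string pass: a single MULTILINE re.sub rewrites every line whose
-- # non-whitespace content ends in "]]" to its stripped prefix, a newline and "]]".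
-- # [^\S\n] is horizontal whitespace only, so matches never cross line boundaries,
-- # and non-matching lines are left byte-for-byte unchanged.
-- _PAT = re.compile(r'^[^\S\n]*(.*?)\]\][^\S\n]*$', re.MULTILINE)
--
--
-- def move_extended_close(content: str) -> str:
--     return _PAT.sub(lambda m: m.group(1) + "\n]]", content)
-- ===== Notes on version B (the rewrite author's own statement) =====
-- stated objective: idiomatic
-- what changed: B replaces A's split-into-lines / strip-and-slice / append-append / join pipeline by a single whole-string MULTILINE regex substitution (re.sub with r'^[^\S\n]*(.*?)\]\][^\S\n]*$' replaced by the stripped prefix, a newline and ']]'), letting the regex engine do the one pass over the string.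
import Mathlib
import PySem

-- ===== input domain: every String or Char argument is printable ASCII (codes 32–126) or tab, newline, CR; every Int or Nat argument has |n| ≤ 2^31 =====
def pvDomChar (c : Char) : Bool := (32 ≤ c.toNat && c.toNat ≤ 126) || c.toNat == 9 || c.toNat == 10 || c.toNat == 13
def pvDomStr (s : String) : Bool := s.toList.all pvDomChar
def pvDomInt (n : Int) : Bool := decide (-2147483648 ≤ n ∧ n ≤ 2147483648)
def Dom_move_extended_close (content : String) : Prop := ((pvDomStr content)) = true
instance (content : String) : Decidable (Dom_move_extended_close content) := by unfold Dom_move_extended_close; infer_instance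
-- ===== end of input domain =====

-- B replaces A's split/strip/slice/append/join line-list pipeline by one MULTILINE
-- regex substitution over the whole string (re.sub with r'^[^\S\n]*(.*?)\]\][^\S\n]*$'
-- → r'\1' + '\n]]'); same cost, idiomatic alternative.

-- ===== PORT A =====
def move_extended_close (content : String) : String :=
  -- content.split("\n"): sep "\n" ≠ "" so Str.split? is always `some`; getD [] is unreachable
  let ls := (PySem.Str.split? content "\n").getD []
  let final := ls.foldl (fun acc l =>
      if PySem.Str.slice (PySem.Str.strip l) (some (-2)) none = "]]" then
        acc ++ [PySem.Str.slice (PySem.Str.strip l) none (some (-2)), "]]"]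
      else acc ++ [l]) ([] : List String)
  PySem.Str.join "\n" final

-- ===== PORT B =====
-- Source B uses re.sub with the fixed MULTILINE pattern r'^[^\S\n]*(.*?)\]\][^\S\n]*$'
-- and replacement r'\1' + '\n]]'. PySem has no regex engine, so the engine's
-- behaviour for THIS pattern is ported by hand, step for step; each piece says
-- where it is exact.

-- the character class [^\S\n]: whitespace that is not a newline (exact for ASCII \s)
def pvIsHws (c : Char) : Bool := PySem.Chars.isspace c && !(c == '\n')

-- the lazy part '(.*?)\]\][^\S\n]*$' tried against the rest of one line
-- (no '\n' present): the engine grows the lazy group one character at a time,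
-- at each length first trying the literal ']]' and then '[^\S\n]*$' (which,
-- inside a single line, succeeds iff everything left is horizontal whitespace).
-- Exact: shortest-match-first is the if-before-recursion order below.
def pvLazy : List Char → Option (List Char)
  | [] =>
      if List.isPrefixOf [']', ']'] ([] : List Char)
          && (([] : List Char).drop 2).all pvIsHws then some [] else none
  | c :: t =>
      if List.isPrefixOf [']', ']'] (c :: t)
          && ((c :: t).drop 2).all pvIsHws then some []
      else (pvLazy t).map (c :: ·)

-- the whole anchored pattern matched against one full line: '^' then the greedy
-- leading '[^\S\n]*' (which, ']' not being whitespace, never has to backtrack),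
-- then the lazy part; returns group 1 on success. Exact for this pattern.
def pvTryMatch (line : List Char) : Option (List Char) :=
  pvLazy (line.dropWhile pvIsHws)

-- replacement of one scan position at a line start: on a match, emit
-- r'\1' + '\n]]'; otherwise the line is copied verbatim.
def pvBLine (line : List Char) : List Char :=
  match pvTryMatch line with
  | some g => g ++ ['\n', ']', ']']
  | none => line

-- re.sub's left-to-right scan: the pattern starts with '^' (MULTILINE), so
-- matches can only start at line starts, and '$' ends every match at the line
-- end; hence the scan visits exactly the lines, copying the '\n' separators.
def pvSubGo (s : List Char) : List Char :=
  match h : s.dropWhile (· ≠ '\n') with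
  | [] => pvBLine s
  | _ :: t => pvBLine (s.takeWhile (· ≠ '\n')) ++ '\n' :: pvSubGo t
termination_by s.length
decreasing_by
  have hle := List.length_dropWhile_le (fun c => decide (c ≠ '\n')) s
  rw [h] at hle
  simp at hle
  omega

def move_extended_close_alt (content : String) : String :=
  String.ofList (pvSubGo content.toList)

-- ===== PRECONDITION & SPEC =====
def Spec_move_extended_close (content : String) (out : String) : Prop := out = move_extended_close_alt content
instance (content : String) (out : String) : Decidable (Spec_move_extended_close content out) := by unfold Spec_move_extended_close; infer_instance

-- ===== CLAIM (what is proved, stated in full; the proofs are below) =====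
def Claim_equal_move_extended_close : Prop := ∀ (content : String), Dom_move_extended_close content → Spec_move_extended_close content (move_extended_close content)

-- ===== LEMMAS AND PROOFS =====

-- Python's split("\n") as plain structural recursion (proof-side helper).
def pvLines : List Char → List (List Char)
  | [] => [[]]
  | c :: rest =>
      if c = '\n' then [] :: pvLines rest
      else
        match pvLines rest with
        | [] => [[c]]   -- unreachable: pvLines is never []
        | L :: Ls => (c :: L) :: Ls

-- A's per-line step at the List Char level.
def pvFA (l : List Char) : List (List Char) :=
  if PySem.Chars.slice (PySem.Chars.strip l) (some (-2)) none = [']', ']'] then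
    [PySem.Chars.slice (PySem.Chars.strip l) none (some (-2)), [']', ']']]
  else [l]

theorem pvLines_ne_nil (l : List Char) : pvLines l ≠ [] := by
  cases l with
  | nil => simp [pvLines]
  | cons c rest =>
    simp only [pvLines]
    split
    · simp
    · split <;> simp

theorem pvLines_take_drop (l : List Char) :
    pvLines l = l.takeWhile (· ≠ '\n') ::
      (match l.dropWhile (· ≠ '\n') with
       | [] => []
       | _ :: t => pvLines t) := by
  induction l with
  | nil => simp [pvLines]
  | cons c rest ih =>
    by_cases hc : c = '\n'
    · subst hc
      simp [pvLines, List.takeWhile_cons, List.dropWhile_cons]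
    · simp only [pvLines, if_neg hc, List.takeWhile_cons, List.dropWhile_cons]
      rw [ih]
      simp [hc]

theorem pv_splitOn_go (fuel : Nat) :
    ∀ (l cur : List Char) (acc : List (List Char)), l.length < fuel →
    PySem.Chars.splitOn.go ['\n'] fuel l cur acc
      = acc.reverse ++ ((cur.reverse ++ (pvLines l).headI) :: (pvLines l).tail) := by
  induction fuel with
  | zero => intro l cur acc h; omega
  | succ fuel ih =>
    intro l cur acc h
    cases l with
    | nil =>
      simp [PySem.Chars.splitOn.go, pvLines]
    | cons c rest =>
      rw [PySem.Chars.splitOn.go]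
      obtain ⟨L, Ls, hLS⟩ : ∃ L Ls, pvLines rest = L :: Ls := by
        cases hr : pvLines rest with
        | nil => exact absurd hr (pvLines_ne_nil rest)
        | cons L Ls => exact ⟨L, Ls, rfl⟩
      by_cases hc : c = '\n'
      · subst hc
        have hpre : List.isPrefixOf ['\n'] ('\n' :: rest) = true := by
          simp [List.isPrefixOf]
        simp only [hpre, if_pos]
        have hdrop : List.drop (['\n'] : List Char).length ('\n' :: rest) = rest := rfl
        rw [hdrop, ih rest [] (cur.reverse :: acc) (by simpa using Nat.lt_of_succ_lt_succ h)]
        simp [pvLines, hLS]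
      · have hpre : List.isPrefixOf ['\n'] (c :: rest) = false := by
          simp [List.isPrefixOf]
          intro hcc
          exact absurd hcc.symm hc
        simp only [hpre, Bool.false_eq_true, if_neg, not_false_iff]
        rw [ih rest (c :: cur) acc (by simpa using Nat.lt_of_succ_lt_succ h)]
        simp [pvLines, hc, hLS]

theorem pv_splitOn_eq_pvLines (l : List Char) :
    PySem.Chars.splitOn l ['\n'] = pvLines l := by
  unfold PySem.Chars.splitOn
  rw [pv_splitOn_go (l.length + 1) l [] [] (by omega)]
  obtain ⟨L, Ls, hLS⟩ : ∃ L Ls, pvLines l = L :: Ls := by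
    cases hr : pvLines l with
    | nil => exact absurd hr (pvLines_ne_nil l)
    | cons L Ls => exact ⟨L, Ls, rfl⟩
  simp [hLS]

-- join over a cons with nonempty tail
theorem pv_join_cons (sep a : List Char) (xs : List (List Char)) (hx : xs ≠ []) :
    PySem.Chars.join sep (a :: xs) = a ++ sep ++ PySem.Chars.join sep xs := by
  cases xs with
  | nil => exact absurd rfl hx
  | cons b xs => exact PySem.Chars.join_cons_cons sep a b xs

-- join over a concatenation of nonempty lists
theorem pv_join_append (sep : List Char) (xs ys : List (List Char))
    (hx : xs ≠ []) (hy : ys ≠ []) :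
    PySem.Chars.join sep (xs ++ ys)
      = PySem.Chars.join sep xs ++ sep ++ PySem.Chars.join sep ys := by
  induction xs with
  | nil => exact absurd rfl hx
  | cons a xs ih =>
    cases xs with
    | nil =>
      cases ys with
      | nil => exact absurd rfl hy
      | cons b ys => simp [PySem.Chars.join_singleton, PySem.Chars.join_cons_cons]
    | cons a' xs' =>
      have h1 : (a :: a' :: xs') ++ ys = a :: ((a' :: xs') ++ ys) := by simp
      rw [h1, pv_join_cons sep a _ (by simp), ih (by simp),
          pv_join_cons sep a (a' :: xs') (by simp)]
      simp

-- whitespace facts -----------------------------------------------------------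

-- "]]" survives an lstrip
theorem pv_suffix_dropWhile_ws (r : List Char) (h : [']', ']'] <:+ r) :
    [']', ']'] <:+ List.dropWhile PySem.Chars.isspace r := by
  induction r with
  | nil => simpa using h.length_le
  | cons a r ih =>
    rw [List.dropWhile_cons]
    by_cases ha : PySem.Chars.isspace a = true
    · rw [if_pos ha]
      obtain ⟨u, hu⟩ := h
      cases u with
      | nil =>
        have : a = ']' := by simpa using congrArg (List.headI) hu.symm
        subst this
        simp [PySem.Chars.isspace] at ha
      | cons b u' =>
        exact ih ⟨u', by simpa using congrArg List.tail hu.symm |>.symm⟩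
    · rw [if_neg ha]
      exact h

theorem pv_drop_suffix2 (v : List Char) :
    (v ++ [']', ']']).drop ((v ++ [']', ']']).length - 2) = [']', ']'] := by
  have h : (v ++ [']', ']']).length - 2 = v.length := by simp
  rw [h, List.drop_left]

theorem pv_dropWhile_concat (p : Char → Bool) (xs : List Char) (a : Char) :
    List.dropWhile p (xs ++ [a])
      = if List.dropWhile p xs = [] then (if p a then [] else [a])
        else List.dropWhile p xs ++ [a] := by
  induction xs with
  | nil => simp [List.dropWhile_cons]
  | cons b xs ih =>
    by_cases hb : p b = true
    · simp only [List.cons_append, List.dropWhile_cons, hb, if_pos, ih]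
    · simp [List.dropWhile_cons, hb]

theorem pv_rstrip_cons (a : Char) (t : List Char) :
    PySem.Chars.rstrip (a :: t)
      = if PySem.Chars.rstrip t = [] then
          (if PySem.Chars.isspace a then [] else [a])
        else a :: PySem.Chars.rstrip t := by
  unfold PySem.Chars.rstrip
  rw [show (a :: t).reverse = t.reverse ++ [a] by simp, pv_dropWhile_concat]
  by_cases h : List.dropWhile PySem.Chars.isspace t.reverse = []
  · rw [if_pos h, if_pos (show (List.dropWhile PySem.Chars.isspace t.reverse).reverse = [] by rw [h]; rfl)]
    split <;> simp
  · rw [if_neg h, if_neg (by simpa using h)]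
    simp

-- lstrip and rstrip commute
theorem pv_strip_comm (l : List Char) :
    PySem.Chars.rstrip (List.dropWhile PySem.Chars.isspace l)
      = List.dropWhile PySem.Chars.isspace (PySem.Chars.rstrip l) := by
  induction l with
  | nil => rfl
  | cons a l ih =>
    by_cases ha : PySem.Chars.isspace a = true
    · rw [List.dropWhile_cons, if_pos ha, pv_rstrip_cons]
      by_cases h0 : PySem.Chars.rstrip l = []
      · rw [if_pos h0, if_pos ha]
        have hall : ∀ x ∈ l, PySem.Chars.isspace x = true := by
          intro x hx
          have := List.dropWhile_eq_nil_iff.mp (by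
            simpa [PySem.Chars.rstrip] using h0)
          exact this x (by simpa using hx)
        rw [List.dropWhile_eq_nil_iff.mpr (by simpa using hall)]
        rfl
      · rw [if_neg h0, List.dropWhile_cons, if_pos ha, ih]
    · rw [List.dropWhile_cons, if_neg ha, pv_rstrip_cons]
      by_cases h0 : PySem.Chars.rstrip l = []
      · rw [if_pos h0, if_neg ha]
        simp [List.dropWhile_cons, ha]
      · rw [if_neg h0, List.dropWhile_cons, if_neg ha]

theorem pv_strip_eq (l : List Char) :
    PySem.Chars.strip l
      = List.dropWhile PySem.Chars.isspace (PySem.Chars.rstrip l) := by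
  have h1 : PySem.Chars.strip l = PySem.Chars.rstrip (PySem.Chars.lstrip l) := rfl
  have h2 : PySem.Chars.lstrip l = List.dropWhile PySem.Chars.isspace l := rfl
  rw [h1, h2, pv_strip_comm]

-- the two "]] at end of line" tests agree
theorem pv_cond_iff (line : List Char) :
    (PySem.Chars.slice (PySem.Chars.strip line) (some (-2)) none = [']', ']'])
      ↔ PySem.Chars.endswith (PySem.Chars.rstrip line) [']', ']'] = true := by
  rw [PySem.Chars.endswith_iff]
  rw [pv_strip_eq, PySem.Chars.slice_eq_listSlice,
      PySem.List.slice_from_neg_ofNat _ 2 (by omega)]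
  constructor
  · intro h
    have hsuf : [']', ']'] <:+ List.dropWhile PySem.Chars.isspace (PySem.Chars.rstrip line) := by
      rw [← h]; exact List.drop_suffix _ _
    exact hsuf.trans (List.dropWhile_suffix _)
  · intro h
    obtain ⟨v, hv⟩ := pv_suffix_dropWhile_ws _ h
    rw [← hv, pv_drop_suffix2]

-- dropping an all-whitespace tail does not change rstrip
theorem pv_rstrip_append_ws (xs ws : List Char) (h : ws.all PySem.Chars.isspace = true) :
    PySem.Chars.rstrip (xs ++ ws) = PySem.Chars.rstrip xs := by
  unfold PySem.Chars.rstrip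
  rw [List.reverse_append, List.dropWhile_append]
  have hnil : List.dropWhile PySem.Chars.isspace ws.reverse = [] := by
    rw [List.dropWhile_eq_nil_iff]
    intro x hx
    exact (List.all_eq_true.mp h) x (by simpa using hx)
  rw [hnil]
  simp

-- every list is its rstrip plus an all-whitespace tail
theorem pv_rstrip_decomp (t : List Char) :
    ∃ ws, t = PySem.Chars.rstrip t ++ ws ∧ ws.all PySem.Chars.isspace = true := by
  refine ⟨(t.reverse.takeWhile PySem.Chars.isspace).reverse, ?_, ?_⟩
  · have h := List.takeWhile_append_dropWhile (p := PySem.Chars.isspace) (l := t.reverse)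
    have h2 := congrArg List.reverse h
    simp only [List.reverse_append, List.reverse_reverse] at h2
    rw [PySem.Chars.rstrip]
    exact h2.symm
  · rw [List.all_eq_true]
    intro x hx
    exact List.mem_takeWhile_imp (by simpa using hx)

-- endswith "]]" needs length ≥ 2
theorem pv_endswith_short (l : List Char) (h : l.length < 2) :
    PySem.Chars.endswith l [']', ']'] = false := by
  rcases he : PySem.Chars.endswith l [']', ']'] with _ | _
  · rfl
  · have := (PySem.Chars.endswith_iff _ _).mp he
    have := this.length_le
    simp at this
    omega

-- characterisation of the lazy search on a newline-free rest of line: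
-- it succeeds iff the rest ends (modulo trailing whitespace) in "]]",
-- and then the group is everything before that "]]".
theorem pv_lazy_eq (r : List Char) (hn : '\n' ∉ r) :
    pvLazy r
      = if PySem.Chars.endswith (PySem.Chars.rstrip r) [']', ']'] = true then
          some ((PySem.Chars.rstrip r).take ((PySem.Chars.rstrip r).length - 2))
        else none := by
  induction r with
  | nil => decide
  | cons a t ih =>
    have hnt : '\n' ∉ t := fun hx => hn (List.mem_cons_of_mem a hx)
    rw [pvLazy]
    by_cases hd : (List.isPrefixOf [']', ']'] (a :: t)
        && ((a :: t).drop 2).all pvIsHws) = true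
    · -- the pattern matches right here: a::t = ']' :: ']' :: ws, ws all hws
      rw [if_pos hd]
      obtain ⟨hpre, hws⟩ := Bool.and_eq_true_iff.mp hd
      cases t with
      | nil => simp [List.isPrefixOf] at hpre
      | cons b u =>
        obtain ⟨ha, hb⟩ : ']' = a ∧ ']' = b := by
          simpa [List.isPrefixOf, and_assoc] using hpre
        subst ha; subst hb
        have hu : u.all PySem.Chars.isspace = true := by
          rw [List.all_eq_true] at hws ⊢
          intro x hx
          have := hws x (by simpa using hx)
          exact (Bool.and_eq_true_iff.mp this).1
        have hr : PySem.Chars.rstrip (']' :: ']' :: u) = [']', ']'] := by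
          have := pv_rstrip_append_ws [']', ']'] u hu
          simpa using this
        rw [hr, if_pos ((PySem.Chars.endswith_iff _ _).mpr (List.suffix_refl _))]
        simp
    · rw [if_neg hd, ih hnt]
      by_cases h0 : PySem.Chars.rstrip t = []
      · -- whole t is whitespace: no match anywhere
        have hra : PySem.Chars.rstrip (a :: t)
            = if PySem.Chars.isspace a then [] else [a] := by
          rw [pv_rstrip_cons, if_pos h0]
        rw [h0, if_neg (by rw [pv_endswith_short [] (by simp)]; simp), hra,
            if_neg (by
              split <;> · rw [pv_endswith_short _ (by simp)]; simp)]
        simp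
      · have hr : PySem.Chars.rstrip (a :: t) = a :: PySem.Chars.rstrip t := by
          rw [pv_rstrip_cons, if_neg h0]
        rw [hr]
        by_cases he : PySem.Chars.endswith (PySem.Chars.rstrip t) [']', ']'] = true
        · rw [if_pos he, if_pos ((PySem.Chars.endswith_iff _ _).mpr
              (((PySem.Chars.endswith_iff _ _).mp he).trans (List.suffix_cons _ _)))]
          have hlen : 2 ≤ (PySem.Chars.rstrip t).length := by
            simpa using ((PySem.Chars.endswith_iff _ _).mp he).length_le
          have harith : (a :: PySem.Chars.rstrip t).length - 2
              = ((PySem.Chars.rstrip t).length - 2) + 1 := by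
            simp only [List.length_cons]; omega
          rw [harith, List.take_succ_cons]
          simp
        · -- neither here nor deeper: a :: rstrip t does not end in "]]" either
          rw [if_neg he, if_neg ?_]
          · simp
          intro hx
          have hsuf := (PySem.Chars.endswith_iff _ _).mp hx
          rcases List.suffix_cons_iff.mp hsuf with heq | hsuf'
          · -- a :: rstrip t = [']',']']: then the head pattern should have fired
            have ha : ']' = a := by simpa using congrArg List.headI heq
            have ht : ([']'] : List Char) = PySem.Chars.rstrip t := by
              simpa using congrArg List.tail heq
            obtain ⟨ws, hws, hwsall⟩ := pv_rstrip_decomp t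
            rw [← ht] at hws
            apply hd
            rw [Bool.and_eq_true_iff]
            subst ha
            refine ⟨by rw [hws]; simp [List.isPrefixOf], ?_⟩
            rw [hws, show ((']' :: ([']'] ++ ws)).drop 2 : List Char) = ws by simp,
                List.all_eq_true]
            intro x hx2
            have hsp := (List.all_eq_true.mp hwsall) x hx2
            have hxn : x ≠ '\n' := fun hxeq => hnt (by
              rw [hws]
              exact List.mem_append_right _ (hxeq ▸ hx2))
            simp [pvIsHws, hsp, hxn]
          · exact absurd ((PySem.Chars.endswith_iff _ _).mpr hsuf') he

-- dropWhile with pointwise-equal predicates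
theorem pv_dropWhile_congr (p q : Char → Bool) (l : List Char)
    (h : ∀ c ∈ l, p c = q c) : l.dropWhile p = l.dropWhile q := by
  induction l with
  | nil => rfl
  | cons a t ih =>
    rw [List.dropWhile_cons, List.dropWhile_cons, h a List.mem_cons_self,
        ih (fun c hc => h c (List.mem_cons_of_mem a hc))]

-- the per-line outputs agree on a newline-free line
theorem pv_line_eq (line : List Char) (hn : '\n' ∉ line) :
    PySem.Chars.join ['\n'] (pvFA line) = pvBLine line := by
  have hdw : line.dropWhile pvIsHws = line.dropWhile PySem.Chars.isspace := by
    apply pv_dropWhile_congr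
    intro c hc
    have : c ≠ '\n' := fun h => hn (h ▸ hc)
    simp [pvIsHws, this]
  have hnl : '\n' ∉ line.dropWhile PySem.Chars.isspace := fun hx =>
    hn ((List.dropWhile_sublist _).subset hx)
  have hmain : pvTryMatch line
      = if PySem.Chars.endswith (PySem.Chars.strip line) [']', ']'] = true then
          some ((PySem.Chars.strip line).take ((PySem.Chars.strip line).length - 2))
        else none := by
    rw [pvTryMatch, hdw, pv_lazy_eq _ hnl, pv_strip_comm, ← pv_strip_eq]
  by_cases hc : PySem.Chars.slice (PySem.Chars.strip line) (some (-2)) none = [']', ']']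
  · have hrs : PySem.Chars.endswith (PySem.Chars.rstrip line) [']', ']'] = true :=
      (pv_cond_iff line).mp hc
    have hss : PySem.Chars.endswith (PySem.Chars.strip line) [']', ']'] = true := by
      rw [PySem.Chars.endswith_iff] at hrs ⊢
      rw [pv_strip_eq]
      exact pv_suffix_dropWhile_ws _ hrs
    rw [pvFA, if_pos hc, pvBLine, hmain, if_pos hss,
        PySem.Chars.join_cons_cons, PySem.Chars.join_singleton,
        PySem.Chars.slice_eq_listSlice, PySem.List.slice_to_neg_ofNat _ 2 (by omega)]
    simp
  · have hss : PySem.Chars.endswith (PySem.Chars.strip line) [']', ']'] ≠ true := by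
      intro h2
      apply hc
      apply (pv_cond_iff line).mpr
      have hsuf := (PySem.Chars.endswith_iff _ _).mp h2
      rw [pv_strip_eq] at hsuf
      exact (PySem.Chars.endswith_iff _ _).mpr (hsuf.trans (List.dropWhile_suffix _))
    rw [pvFA, if_neg hc, pvBLine, hmain, if_neg hss]
    simp [PySem.Chars.join_singleton]

-- flatMap over A's pieces joins to the map of B's line transform
theorem pv_join_flatMap (L : List (List Char)) (hn : ∀ l ∈ L, '\n' ∉ l) :
    PySem.Chars.join ['\n'] (L.flatMap pvFA)
      = PySem.Chars.join ['\n'] (L.map pvBLine) := by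
  induction L with
  | nil => simp
  | cons l L ih =>
    have hl : '\n' ∉ l := hn l List.mem_cons_self
    have hL : ∀ x ∈ L, '\n' ∉ x := fun x hx => hn x (List.mem_cons_of_mem l hx)
    cases L with
    | nil => simp [pv_line_eq l hl]
    | cons l' L' =>
      have hfa : pvFA l ≠ [] := by unfold pvFA; split <;> simp
      have hrest : (l' :: L').flatMap pvFA ≠ [] := by
        have h' : pvFA l' ≠ [] := by unfold pvFA; split <;> simp
        simp only [List.flatMap_cons]
        intro hcontra
        exact h' (List.append_eq_nil_iff.mp hcontra).1
      rw [List.flatMap_cons, pv_join_append _ _ _ hfa hrest, pv_line_eq l hl, ih hL,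
          show List.map pvBLine (l :: l' :: L')
              = pvBLine l :: pvBLine l' :: List.map pvBLine L' from rfl,
          PySem.Chars.join_cons_cons]
      rfl

-- every line produced by split("\n") is newline-free
theorem pvLines_no_nl (s : List Char) : ∀ l ∈ pvLines s, '\n' ∉ l := by
  induction s with
  | nil =>
    intro l hl
    simp [pvLines] at hl
    simp [hl]
  | cons c rest ih =>
    intro l hl
    by_cases hc : c = '\n'
    · subst hc
      rw [show pvLines ('\n' :: rest) = [] :: pvLines rest from by simp [pvLines]] at hl
      rcases List.mem_cons.mp hl with h | h
      · simp [h]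
      · exact ih l h
    · simp only [pvLines, if_neg hc] at hl
      obtain ⟨L, Ls, hLS⟩ : ∃ L Ls, pvLines rest = L :: Ls := by
        cases hr : pvLines rest with
        | nil => exact absurd hr (pvLines_ne_nil rest)
        | cons L Ls => exact ⟨L, Ls, rfl⟩
      rw [hLS] at hl
      rcases List.mem_cons.mp hl with h | h
      · subst h
        intro hx
        rcases List.mem_cons.mp hx with h' | h'
        · exact hc h'.symm
        · exact ih L (hLS ▸ List.mem_cons_self) h'
      · exact ih l (hLS ▸ List.mem_cons_of_mem L h)

-- B's regex sweep computes the '\n'-join of the per-line replacements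
theorem pv_subGo_eq (l : List Char) :
    pvSubGo l = PySem.Chars.join ['\n'] ((pvLines l).map pvBLine) := by
  induction l using pvSubGo.induct with
  | case1 rest h =>
    have htake : rest.takeWhile (· ≠ '\n') = rest := by
      have hsplit := List.takeWhile_append_dropWhile (p := fun c => decide (c ≠ '\n')) (l := rest)
      rw [h] at hsplit
      simpa using hsplit
    rw [pvSubGo, h, pvLines_take_drop, h, htake]
    simp [PySem.Chars.join_singleton]
  | case2 rest c t h ih =>
    rw [pvSubGo, h, pvLines_take_drop, h]
    simp only [List.map_cons]
    rw [pv_join_cons _ _ _ (by simpa using pvLines_ne_nil t), ih]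
    simp

-- A's result, moved to the List Char level
theorem pv_A_toList (content : String) :
    (move_extended_close content).toList
      = PySem.Chars.join ['\n'] ((pvLines content.toList).flatMap pvFA) := by
  obtain ⟨LS, hLS, hmap⟩ : ∃ LS, PySem.Str.split? content "\n" = some LS ∧
      LS.map String.toList = pvLines content.toList := by
    have h := PySem.Str.split?_map content "\n"
    rw [show ("\n" : String).toList = ['\n'] by rfl] at h
    rw [PySem.Chars.split?] at h
    simp only [List.isEmpty_cons, if_neg] at h
    cases hs : PySem.Str.split? content "\n" with
    | none => rw [hs] at h; simp at h
    | some LS =>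
      rw [hs] at h
      simp at h
      exact ⟨LS, rfl, by rw [h, pv_splitOn_eq_pvLines]⟩
  have hstep : (fun (acc : List String) (l : String) =>
      if PySem.Str.slice (PySem.Str.strip l) (some (-2)) none = "]]" then
        acc ++ [PySem.Str.slice (PySem.Str.strip l) none (some (-2)), "]]"]
      else acc ++ [l])
      = (fun acc l => acc ++
          (if PySem.Str.slice (PySem.Str.strip l) (some (-2)) none = "]]" then
            [PySem.Str.slice (PySem.Str.strip l) none (some (-2)), "]]"]
          else [l])) := by
    funext acc l
    split <;> rfl
  simp only [move_extended_close, hLS, Option.getD_some, hstep,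
    PySem.List.foldl_append_eq_flatMap, List.nil_append]
  have hline : ∀ (l : String),
      (if PySem.Str.slice (PySem.Str.strip l) (some (-2)) none = "]]" then
         [PySem.Str.slice (PySem.Str.strip l) none (some (-2)), "]]"]
       else [l]).map String.toList = pvFA l.toList := by
    intro l
    have hx : ∀ (a? b? : Option Int),
        (PySem.Str.slice (PySem.Str.strip l) a? b?).toList
          = PySem.Chars.slice (PySem.Chars.strip l.toList) a? b? := by
      intro a? b?
      rw [PySem.Str.toList_slice, PySem.Str.toList_strip]
    have hcond : (PySem.Str.slice (PySem.Str.strip l) (some (-2)) none = "]]")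
        ↔ (PySem.Chars.slice (PySem.Chars.strip l.toList) (some (-2)) none
            = [']', ']']) := by
      rw [← String.toList_inj, hx, show ("]]" : String).toList = [']', ']'] from rfl]
    by_cases hc : PySem.Chars.slice (PySem.Chars.strip l.toList) (some (-2)) none
        = [']', ']']
    · rw [if_pos (hcond.mpr hc), pvFA, if_pos hc]
      simp [hx]
    · rw [if_neg (fun hs => hc (hcond.mp hs)), pvFA, if_neg hc]
      simp
  rw [PySem.Str.toList_join, show ("\n" : String).toList = ['\n'] by rfl]
  rw [← hmap, List.map_flatMap, List.flatMap_map]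
  simp only [hline]

-- ===== VERDICT (by name: the statement is the Claim_ definition above) =====
theorem move_extended_close_spec : Claim_equal_move_extended_close := by
  intro content _
  unfold Spec_move_extended_close move_extended_close_alt
  rw [← String.toList_inj, String.toList_ofList, pv_A_toList,
      pv_join_flatMap _ (pvLines_no_nl _), ← pv_subGo_eq]
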